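-- pv_equiv track=rewrite | github.com/evelonz/AoC | Python/2021/day20.py | setPixelsToCheck
-- ===== SOURCE A (Python) =====
-- from collections import namedtuple
--
-- Bounds = namedtuple('Bounds', 'minX maxX minY maxY')
--
-- def setPixelsToCheck(image):
--     pixelsToCheck = set()
--     minX = 9999
--     minY = 9999
--     maxX = -9999
--     maxY = -9999
--     for pixel in image:
--         pixelsToCheck.add((pixel[0]-1, pixel[1]-1))
--         pixelsToCheck.add((pixel[0]  , pixel[1]-1))
--         pixelsToCheck.add((pixel[0]+1, pixel[1]-1))
--
--         pixelsToCheck.add((pixel[0]-1, pixel[1]))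
--         pixelsToCheck.add((pixel[0]  , pixel[1]))
--         pixelsToCheck.add((pixel[0]+1, pixel[1]))
--
--         pixelsToCheck.add((pixel[0]-1, pixel[1]+1))
--         pixelsToCheck.add((pixel[0]  , pixel[1]+1))
--         pixelsToCheck.add((pixel[0]+1, pixel[1]+1))
--
--         if pixel[0]-1 < minX:
--             minX = pixel[0]-1
--         if pixel[0]+1 > maxX:
--             maxX = pixel[0]+1
--         if pixel[1]-1 < minY:
--             minY = pixel[1]-1
--         if pixel[1]+1 > maxY:
--             maxY = pixel[1]+1
--     return (pixelsToCheck, Bounds(minX, maxX, minY, maxY))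
-- ===== SOURCE B (Python) =====
-- from collections import namedtuple
--
-- Bounds = namedtuple('Bounds', 'minX maxX minY maxY')
--
-- def setPixelsToCheck(image):
--     # bottom-up tournament: one leaf result per pixel, then repeatedly merge
--     # adjacent pairs (set union + pairwise min/max of bounds) until one remains
--     if not image:
--         return (set(), Bounds(9999, -9999, 9999, -9999))
--     results = []
--     for (x, y) in image:
--         block = {(x + dx, y + dy) for dy in (-1, 0, 1) for dx in (-1, 0, 1)}
--         results.append((block, Bounds(x - 1, x + 1, y - 1, y + 1)))
--     while len(results) > 1:
--         out = []
--         pending = None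
--         for r in results:
--             if pending is None:
--                 pending = r
--             else:
--                 out.append((pending[0] | r[0],
--                             Bounds(min(pending[1].minX, r[1].minX),
--                                    max(pending[1].maxX, r[1].maxX),
--                                    min(pending[1].minY, r[1].minY),
--                                    max(pending[1].maxY, r[1].maxY))))
--                 pending = None
--         if pending is not None:
--             out.append(pending)
--         results = out
--     return results[0]
-- ===== Notes on version B (the rewrite author's own statement) =====
-- stated objective: alternative
-- what changed: Replaces A's fused single-pass accumulator loop by a bottom-up tournament: one leaf result (9-neighbour block, padded per-pixel bounds) per pixel, then repeated rounds merging adjacent pairs by set union and pairwise min/max of bounds until one result remains; B's bounds come from the pixels themselves instead of being clamped against A's 9999/-9999 sentinels.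
-- intended difference: On nonempty images whose pixels all have x > 10000 (or all x < -10000, or the same for y), A's sentinel initialisation clamps the corresponding bound to 9999 (resp. -9999) instead of the true padded extreme, while B returns the actual bounding-box extreme, which is the intended bound of the image. — e.g. on setPixelsToCheck([(10001, 0)]): A returns ([(10000, -1), (10001, -1), (10002, -1), (10000, 0), (10001, 0), (10002, 0), (10000, 1), (10001, 1), (10002, 1)], (9999…, B returns ([(10000, -1), (10001, -1), (10002, -1), (10000, 0), (10001, 0), (10002, 0), (10000, 1), (10001, 1), (10002, 1)], (1000…
import Mathlib
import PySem

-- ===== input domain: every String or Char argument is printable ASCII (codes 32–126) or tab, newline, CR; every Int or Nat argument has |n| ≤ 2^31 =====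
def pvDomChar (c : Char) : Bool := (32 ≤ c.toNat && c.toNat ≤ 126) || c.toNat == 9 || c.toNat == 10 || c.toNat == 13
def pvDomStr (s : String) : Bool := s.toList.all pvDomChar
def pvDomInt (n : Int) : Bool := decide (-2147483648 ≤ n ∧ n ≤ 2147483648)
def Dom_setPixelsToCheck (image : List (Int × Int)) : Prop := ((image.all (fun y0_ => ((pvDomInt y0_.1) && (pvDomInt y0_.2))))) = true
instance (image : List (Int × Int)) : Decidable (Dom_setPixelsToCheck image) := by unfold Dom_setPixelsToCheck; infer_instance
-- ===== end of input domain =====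

-- B replaces A's fused single-pass accumulator loop by a bottom-up tournament: one leaf result per
-- pixel, then rounds of adjacent-pair merges (set union, pairwise min/max of bounds); B's bounds
-- are the true padded extremes, not clamped by A's 9999/-9999 sentinels (objective: alternative).

-- ===== PORT A =====
-- one fused loop: add the nine neighbours to the set and update the four running bounds
def setPixelsToCheck (image : List (Int × Int)) : (List (Int × Int)) × (Int × Int × Int × Int) :=
  let r := image.foldl
    (fun (acc : PySem.Set (Int × Int) × Int × Int × Int × Int) pixel =>
      let s := acc.1
      let minX := acc.2.1; let minY := acc.2.2.1; let maxX := acc.2.2.2.1; let maxY := acc.2.2.2.2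
      let s := (((((((((s.add (pixel.1-1, pixel.2-1)).add (pixel.1, pixel.2-1)).add
        (pixel.1+1, pixel.2-1)).add (pixel.1-1, pixel.2)).add (pixel.1, pixel.2)).add
        (pixel.1+1, pixel.2)).add (pixel.1-1, pixel.2+1)).add (pixel.1, pixel.2+1)).add
        (pixel.1+1, pixel.2+1))
      let minX := if pixel.1 - 1 < minX then pixel.1 - 1 else minX
      let maxX := if pixel.1 + 1 > maxX then pixel.1 + 1 else maxX
      let minY := if pixel.2 - 1 < minY then pixel.2 - 1 else minY
      let maxY := if pixel.2 + 1 > maxY then pixel.2 + 1 else maxY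
      (s, minX, minY, maxX, maxY))
    (PySem.Set.empty, 9999, 9999, -9999, -9999)
  (r.1, (r.2.1, r.2.2.2.1, r.2.2.1, r.2.2.2.2))

-- ===== PORT B =====
-- the 'while len(results) > 1' loop: each round merges adjacent pairs via a fold carrying the
-- pending left element; ported with a Nat fuel (= number of leaves), proven sufficient below
def pvWhileRounds (fuel : Nat) (rs : List ((List (Int × Int)) × (Int × Int × Int × Int))) :
    List ((List (Int × Int)) × (Int × Int × Int × Int)) :=
  match fuel with
  | 0 => rs
  | fuel + 1 =>
    if 1 < rs.length then
      let st := rs.foldl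
        (fun (acc : List ((List (Int × Int)) × (Int × Int × Int × Int)) ×
                    Option ((List (Int × Int)) × (Int × Int × Int × Int))) r =>
          match acc.2 with
          | none => (acc.1, some r)
          | some p => (acc.1 ++ [(PySem.Set.union p.1 r.1,
              (min p.2.1 r.2.1, max p.2.2.1 r.2.2.1, min p.2.2.2.1 r.2.2.2.1,
               max p.2.2.2.2 r.2.2.2.2))], none))
        ([], none)
      let out := match st.2 with
        | none => st.1
        | some p => st.1 ++ [p]
      pvWhileRounds fuel out
    else rs

def setPixelsToCheck_alt (image : List (Int × Int)) : (List (Int × Int)) × (Int × Int × Int × Int) :=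
  if image = [] then (PySem.Set.empty, (9999, -9999, 9999, -9999))
  else
    let results := image.foldl
      (fun acc pq =>
        acc ++ [(PySem.Set.ofList (([(-1 : Int), 0, 1]).flatMap (fun dy =>
                  ([(-1 : Int), 0, 1]).map (fun dx => (pq.1 + dx, pq.2 + dy)))),
                (pq.1 - 1, pq.1 + 1, pq.2 - 1, pq.2 + 1))]) []
    PySem.List.pyGetD (pvWhileRounds results.length results) 0 (PySem.Set.empty, (9999, -9999, 9999, -9999))

-- ===== PRECONDITION & SPEC =====
-- On nonempty images all of whose pixels have x > 10000 (or all x < -10000, or likewise for y),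
-- A's 9999/-9999 sentinel initialisation clamps that bound to the sentinel, while B returns the
-- image's true padded extreme, which is the intended bounding box.
def D_setPixelsToCheck (image : List (Int × Int)) : Prop :=
  (!image.isEmpty && (image.all (fun p => decide (10000 < p.1)) ||
    image.all (fun p => decide (p.1 < -10000)) ||
    image.all (fun p => decide (10000 < p.2)) ||
    image.all (fun p => decide (p.2 < -10000)))) = true
instance (image : List (Int × Int)) : Decidable (D_setPixelsToCheck image) := by
  unfold D_setPixelsToCheck; infer_instance

def Spec_setPixelsToCheck (image : List (Int × Int)) (out : (List (Int × Int)) × (Int × Int × Int × Int)) : Prop := ¬ D_setPixelsToCheck image → out = setPixelsToCheck_alt image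
instance (image : List (Int × Int)) (out : (List (Int × Int)) × (Int × Int × Int × Int)) : Decidable (Spec_setPixelsToCheck image out) := by unfold Spec_setPixelsToCheck; infer_instance

def pvDiffWitness_setPixelsToCheck : (List (Int × Int)) := [(10001, 0)]
def pvDiffWitnessOut_setPixelsToCheck : ((List (Int × Int)) × (Int × Int × Int × Int)) × ((List (Int × Int)) × (Int × Int × Int × Int)) :=
  (([(10000, -1), (10001, -1), (10002, -1), (10000, 0), (10001, 0), (10002, 0), (10000, 1), (10001, 1), (10002, 1)], (9999, 10002, -1, 1)),
   ([(10000, -1), (10001, -1), (10002, -1), (10000, 0), (10001, 0), (10002, 0), (10000, 1), (10001, 1), (10002, 1)], (10000, 10002, -1, 1)))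

-- ===== CLAIM (what is proved, stated in full; the proofs are below) =====
def Claim_unchanged_setPixelsToCheck : Prop := ∀ (image : List (Int × Int)), Dom_setPixelsToCheck image → Spec_setPixelsToCheck image (setPixelsToCheck image)
def Claim_changed_setPixelsToCheck : Prop := Dom_setPixelsToCheck (pvDiffWitness_setPixelsToCheck) ∧ D_setPixelsToCheck (pvDiffWitness_setPixelsToCheck) ∧ setPixelsToCheck (pvDiffWitness_setPixelsToCheck) = pvDiffWitnessOut_setPixelsToCheck.1 ∧ setPixelsToCheck_alt (pvDiffWitness_setPixelsToCheck) = pvDiffWitnessOut_setPixelsToCheck.2 ∧ pvDiffWitnessOut_setPixelsToCheck.1 ≠ pvDiffWitnessOut_setPixelsToCheck.2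
def Claim_exact_setPixelsToCheck : Prop := ∀ (image : List (Int × Int)), Dom_setPixelsToCheck image → D_setPixelsToCheck image → setPixelsToCheck image ≠ setPixelsToCheck_alt image

-- ===== LEMMAS AND PROOFS =====

-- the nine neighbours of a pixel, in A's insertion order (= B's dy-outer, dx-inner order)
def pvNine (p : Int × Int) : List (Int × Int) :=
  [(p.1-1, p.2-1), (p.1, p.2-1), (p.1+1, p.2-1),
   (p.1-1, p.2),   (p.1, p.2),   (p.1+1, p.2),
   (p.1-1, p.2+1), (p.1, p.2+1), (p.1+1, p.2+1)]

theorem pvD_iff (image : List (Int × Int)) :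
    D_setPixelsToCheck image ↔
      (image ≠ [] ∧ ((∀ p ∈ image, 10000 < p.1) ∨ (∀ p ∈ image, p.1 < -10000) ∨
                     (∀ p ∈ image, 10000 < p.2) ∨ (∀ p ∈ image, p.2 < -10000))) := by
  unfold D_setPixelsToCheck
  simp [List.all_eq_true, List.isEmpty_iff, or_assoc]

-- A's fused fold splits into one set fold plus four independent min/max folds
theorem pvFusedSplit (image : List (Int × Int)) :
    ∀ (s : PySem.Set (Int × Int)) (a b c d : Int),
    image.foldl
      (fun (acc : PySem.Set (Int × Int) × Int × Int × Int × Int) pixel =>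
        let s := acc.1
        let minX := acc.2.1; let minY := acc.2.2.1; let maxX := acc.2.2.2.1; let maxY := acc.2.2.2.2
        let s := (((((((((s.add (pixel.1-1, pixel.2-1)).add (pixel.1, pixel.2-1)).add
          (pixel.1+1, pixel.2-1)).add (pixel.1-1, pixel.2)).add (pixel.1, pixel.2)).add
          (pixel.1+1, pixel.2)).add (pixel.1-1, pixel.2+1)).add (pixel.1, pixel.2+1)).add
          (pixel.1+1, pixel.2+1))
        let minX := if pixel.1 - 1 < minX then pixel.1 - 1 else minX
        let maxX := if pixel.1 + 1 > maxX then pixel.1 + 1 else maxX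
        let minY := if pixel.2 - 1 < minY then pixel.2 - 1 else minY
        let maxY := if pixel.2 + 1 > maxY then pixel.2 + 1 else maxY
        (s, minX, minY, maxX, maxY))
      (s, a, b, c, d) =
    ((image.flatMap pvNine).foldl PySem.Set.add s,
     (image.map (fun p => p.1 - 1)).foldl min a,
     (image.map (fun p => p.2 - 1)).foldl min b,
     (image.map (fun p => p.1 + 1)).foldl max c,
     (image.map (fun p => p.2 + 1)).foldl max d) := by
  induction image with
  | nil => intro s a b c d; rfl
  | cons p t ih =>
    intro s a b c d
    simp only [List.foldl_cons, List.flatMap_cons, List.map_cons, List.foldl_append, ih]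
    have h1 : (if p.1 - 1 < a then p.1 - 1 else a) = min a (p.1 - 1) := by omega
    have h2 : (if p.2 - 1 < b then p.2 - 1 else b) = min b (p.2 - 1) := by omega
    have h3 : (if p.1 + 1 > c then p.1 + 1 else c) = max c (p.1 + 1) := by omega
    have h4 : (if p.2 + 1 > d then p.2 + 1 else d) = max d (p.2 + 1) := by omega
    rw [h1, h2, h3, h4]
    simp only [pvNine, List.foldl_cons, List.foldl_nil]

-- min/max fold facts --------------------------------------------------------

theorem pvMinShift (l : List Int) : ∀ (a x : Int), l.foldl min (min a x) = min a (l.foldl min x) := by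
  induction l with
  | nil => intro a x; rfl
  | cons y t ih =>
    intro a x
    rw [List.foldl_cons, List.foldl_cons, min_assoc, ih]

theorem pvMaxShift (l : List Int) : ∀ (a x : Int), l.foldl max (max a x) = max a (l.foldl max x) := by
  induction l with
  | nil => intro a x; rfl
  | cons y t ih =>
    intro a x
    rw [List.foldl_cons, List.foldl_cons, max_assoc, ih]

theorem pvFoldlMin (l : List Int) (a : Int) : l.foldl min a = (l.min?.elim a (min a)) := by
  cases l with
  | nil => rfl
  | cons x t =>
    rw [List.foldl_cons, List.min?_cons']
    exact pvMinShift t a x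

theorem pvFoldlMax (l : List Int) (a : Int) : l.foldl max a = (l.max?.elim a (max a)) := by
  cases l with
  | nil => rfl
  | cons x t =>
    rw [List.foldl_cons, List.max?_cons']
    exact pvMaxShift t a x

theorem pvMinAppend (l r : List Int) :
    (l ++ r).min? = match l.min?, r.min? with
      | none, b => b | some a, none => some a | some a, some b => some (min a b) := by
  cases l with
  | nil => simp
  | cons x t =>
    cases r with
    | nil => simp
    | cons y s =>
      simp only [List.cons_append, List.min?_cons', List.foldl_append]
      rw [pvFoldlMin (y :: s) (List.foldl min x t), List.min?_cons']
      simp [Option.elim]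

theorem pvMaxAppend (l r : List Int) :
    (l ++ r).max? = match l.max?, r.max? with
      | none, b => b | some a, none => some a | some a, some b => some (max a b) := by
  cases l with
  | nil => simp
  | cons x t =>
    cases r with
    | nil => simp
    | cons y s =>
      simp only [List.cons_append, List.max?_cons', List.foldl_append]
      rw [pvFoldlMax (y :: s) (List.foldl max x t), List.max?_cons']
      simp [Option.elim]

theorem pvFoldlMin_le (l : List Int) : ∀ (a : Int), l.foldl min a ≤ a ∧ ∀ x ∈ l, l.foldl min a ≤ x := by
  induction l with
  | nil => intro a; exact ⟨le_refl a, by simp⟩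
  | cons y t ih =>
    intro a
    rw [List.foldl_cons]
    obtain ⟨h1, h2⟩ := ih (min a y)
    refine ⟨le_trans h1 (min_le_left a y), ?_⟩
    intro x hx
    rcases List.mem_cons.mp hx with rfl | hx
    · exact le_trans h1 (min_le_right a x)
    · exact h2 x hx

theorem pvFoldlMax_le (l : List Int) : ∀ (a : Int), a ≤ l.foldl max a ∧ ∀ x ∈ l, x ≤ l.foldl max a := by
  induction l with
  | nil => intro a; exact ⟨le_refl a, by simp⟩
  | cons y t ih =>
    intro a
    rw [List.foldl_cons]
    obtain ⟨h1, h2⟩ := ih (max a y)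
    refine ⟨le_trans (le_max_left a y) h1, ?_⟩
    intro x hx
    rcases List.mem_cons.mp hx with rfl | hx
    · exact le_trans (le_max_right a x) h1
    · exact h2 x hx

theorem pvMin?_le (l : List Int) (m x : Int) (h : l.min? = some m) (hx : x ∈ l) : m ≤ x := by
  cases l with
  | nil => simp at h
  | cons y t =>
    rw [List.min?_cons'] at h
    obtain rfl : List.foldl min y t = m := Option.some.inj h
    rcases List.mem_cons.mp hx with rfl | hx
    · exact (pvFoldlMin_le t x).1
    · exact (pvFoldlMin_le t y).2 x hx

theorem pvLe_max? (l : List Int) (m x : Int) (h : l.max? = some m) (hx : x ∈ l) : x ≤ m := by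
  cases l with
  | nil => simp at h
  | cons y t =>
    rw [List.max?_cons'] at h
    obtain rfl : List.foldl max y t = m := Option.some.inj h
    rcases List.mem_cons.mp hx with rfl | hx
    · exact (pvFoldlMax_le t x).1
    · exact (pvFoldlMax_le t y).2 x hx

theorem pvFoldlMin_mem (l : List Int) : ∀ (a : Int), l.foldl min a = a ∨ l.foldl min a ∈ l := by
  induction l with
  | nil => intro a; exact Or.inl rfl
  | cons y t ih =>
    intro a
    rw [List.foldl_cons]
    rcases ih (min a y) with h | h
    · rcases min_choice a y with hc | hc
      · exact Or.inl (h.trans hc)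
      · exact Or.inr (List.mem_cons.mpr (Or.inl (h.trans hc)))
    · exact Or.inr (List.mem_cons.mpr (Or.inr h))

theorem pvFoldlMax_mem (l : List Int) : ∀ (a : Int), l.foldl max a = a ∨ l.foldl max a ∈ l := by
  induction l with
  | nil => intro a; exact Or.inl rfl
  | cons y t ih =>
    intro a
    rw [List.foldl_cons]
    rcases ih (max a y) with h | h
    · rcases max_choice a y with hc | hc
      · exact Or.inl (h.trans hc)
      · exact Or.inr (List.mem_cons.mpr (Or.inl (h.trans hc)))
    · exact Or.inr (List.mem_cons.mpr (Or.inr h))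

theorem pvMin?_mem (l : List Int) (m : Int) (h : l.min? = some m) : m ∈ l := by
  cases l with
  | nil => simp at h
  | cons y t =>
    rw [List.min?_cons'] at h
    obtain rfl : List.foldl min y t = m := Option.some.inj h
    rcases pvFoldlMin_mem t y with h | h
    · rw [h]; simp
    · exact List.mem_cons.mpr (Or.inr h)

theorem pvMax?_mem (l : List Int) (m : Int) (h : l.max? = some m) : m ∈ l := by
  cases l with
  | nil => simp at h
  | cons y t =>
    rw [List.max?_cons'] at h
    obtain rfl : List.foldl max y t = m := Option.some.inj h
    rcases pvFoldlMax_mem t y with h | h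
    · rw [h]; simp
    · exact List.mem_cons.mpr (Or.inr h)

-- set facts ------------------------------------------------------------------

theorem pvUpdateOfList {α : Type} [BEq α] [LawfulBEq α] (s : PySem.Set α) (r : List α) :
    PySem.Set.update s (PySem.Set.ofList r) = PySem.Set.update s r := by
  rw [PySem.Set.update_eq_append_filter, PySem.Set.update_eq_append_filter,
    PySem.Set.ofList_ofList]

-- characterisation of B: neighbour set is set(flatMap pvNine), bounds are padded min?/max?
def pvBSpec (seg : List (Int × Int)) : (List (Int × Int)) × (Int × Int × Int × Int) :=
  (PySem.Set.ofList (seg.flatMap pvNine),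
   ((seg.map (fun p => p.1 - 1)).min?.getD 9999,
    (seg.map (fun p => p.1 + 1)).max?.getD (-9999),
    (seg.map (fun p => p.2 - 1)).min?.getD 9999,
    (seg.map (fun p => p.2 + 1)).max?.getD (-9999)))

-- the merge of one pass, named (definitionally the inline expression in the ports of B)
def pvMerge (p r : (List (Int × Int)) × (Int × Int × Int × Int)) :
    (List (Int × Int)) × (Int × Int × Int × Int) :=
  (PySem.Set.union p.1 r.1,
   (min p.2.1 r.2.1, max p.2.2.1 r.2.2.1, min p.2.2.2.1 r.2.2.2.1, max p.2.2.2.2 r.2.2.2.2))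

def pvStep (acc : List ((List (Int × Int)) × (Int × Int × Int × Int)) ×
                  Option ((List (Int × Int)) × (Int × Int × Int × Int)))
    (r : (List (Int × Int)) × (Int × Int × Int × Int)) :
    List ((List (Int × Int)) × (Int × Int × Int × Int)) ×
    Option ((List (Int × Int)) × (Int × Int × Int × Int)) :=
  match acc.2 with
  | none => (acc.1, some r)
  | some p => (acc.1 ++ [pvMerge p r], none)

def pvPass (rs : List ((List (Int × Int)) × (Int × Int × Int × Int))) :
    List ((List (Int × Int)) × (Int × Int × Int × Int)) :=
  let st := rs.foldl pvStep ([], none)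
  match st.2 with
  | none => st.1
  | some p => st.1 ++ [p]

theorem pvStepShift (rs : List ((List (Int × Int)) × (Int × Int × Int × Int))) :
    ∀ (out : List ((List (Int × Int)) × (Int × Int × Int × Int)))
      (pend : Option ((List (Int × Int)) × (Int × Int × Int × Int))),
    rs.foldl pvStep (out, pend) =
      (out ++ (rs.foldl pvStep ([], pend)).1, (rs.foldl pvStep ([], pend)).2) := by
  induction rs with
  | nil => intro out pend; simp
  | cons r t ih =>
    intro out pend
    cases pend with
    | none =>
      simp only [List.foldl_cons, pvStep]
      exact ih out (some r)
    | some p =>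
      simp only [List.foldl_cons, pvStep, List.nil_append]
      rw [ih (out ++ [pvMerge p r]) none, ih [pvMerge p r] none, List.append_assoc]

theorem pvPass_cons2 (a b : (List (Int × Int)) × (Int × Int × Int × Int))
    (t : List ((List (Int × Int)) × (Int × Int × Int × Int))) :
    pvPass (a :: b :: t) = pvMerge a b :: pvPass t := by
  unfold pvPass
  simp only [List.foldl_cons, pvStep, List.nil_append]
  rw [pvStepShift t [pvMerge a b] none]
  cases h : (t.foldl pvStep ([], none)).2 <;> simp

-- while-body of B equals pvPass (they are the same code)
theorem pvWhileRounds_step (fuel : Nat) (rs : List ((List (Int × Int)) × (Int × Int × Int × Int)))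
    (h : 1 < rs.length) : pvWhileRounds (fuel + 1) rs = pvWhileRounds fuel (pvPass rs) := by
  rw [pvWhileRounds]
  simp only [if_pos h]
  rfl

theorem pvWhileRounds_stop (fuel : Nat) (rs : List ((List (Int × Int)) × (Int × Int × Int × Int)))
    (h : ¬ 1 < rs.length) : pvWhileRounds fuel rs = rs := by
  cases fuel with
  | zero => rfl
  | succ f => rw [pvWhileRounds]; simp [if_neg h]

-- pairwise joining of segments
def pvPairJoin : List (List (Int × Int)) → List (List (Int × Int))
  | [] => []
  | [s] => [s]
  | a :: b :: t => (a ++ b) :: pvPairJoin t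

theorem pvPairJoin_flatten (segs : List (List (Int × Int))) :
    (pvPairJoin segs).flatten = segs.flatten := by
  induction segs using pvPairJoin.induct with
  | case1 => rfl
  | case2 s => rfl
  | case3 a b t ih => simp [pvPairJoin, ih, List.flatten_cons, List.append_assoc]

theorem pvPairJoin_length (a b : List (Int × Int)) (t : List (List (Int × Int))) :
    (pvPairJoin (a :: b :: t)).length ≤ t.length + 1 := by
  induction t using pvPairJoin.induct with
  | case1 => simp [pvPairJoin]
  | case2 s => simp [pvPairJoin]
  | case3 c d u ih =>
    have : (pvPairJoin (c :: d :: u)).length ≤ u.length + 1 := by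
      simpa [pvPairJoin] using ih
    simp [pvPairJoin] at this ⊢
    omega

theorem pvPairJoin_ne_nil (segs : List (List (Int × Int))) (h : segs ≠ []) :
    pvPairJoin segs ≠ [] := by
  cases segs with
  | nil => exact absurd rfl h
  | cons a t => cases t <;> simp [pvPairJoin]

theorem pvPairJoin_nonempty (segs : List (List (Int × Int))) (h : ∀ s ∈ segs, s ≠ []) :
    ∀ s ∈ pvPairJoin segs, s ≠ [] := by
  induction segs using pvPairJoin.induct with
  | case1 => simp [pvPairJoin]
  | case2 s => simpa [pvPairJoin] using h
  | case3 a b t ih =>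
    intro s hs
    rw [pvPairJoin] at hs
    rcases List.mem_cons.mp hs with rfl | hs
    · have := h a (by simp)
      simp [this]
    · exact ih (fun u hu => h u (by simp [hu])) s hs

-- merging two segment summaries is the summary of the concatenation
theorem pvMerge_spec (s1 s2 : List (Int × Int)) (h1 : s1 ≠ []) (h2 : s2 ≠ []) :
    pvMerge (pvBSpec s1) (pvBSpec s2) = pvBSpec (s1 ++ s2) := by
  unfold pvMerge pvBSpec
  have hset : PySem.Set.union (PySem.Set.ofList (s1.flatMap pvNine)) (PySem.Set.ofList (s2.flatMap pvNine))
      = PySem.Set.ofList ((s1 ++ s2).flatMap pvNine) := by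
    rw [List.flatMap_append, PySem.Set.ofList_append, ← pvUpdateOfList]
    rfl
  have hne : ∀ (f : Int × Int → Int) (l : List (Int × Int)), l ≠ [] → ∃ m, (l.map f).min? = some m := by
    intro f l hl
    cases hm : (l.map f).min? with
    | none => exact absurd (List.map_eq_nil_iff.mp (List.min?_eq_none_iff.mp hm)) hl
    | some m => exact ⟨m, rfl⟩
  have hne' : ∀ (f : Int × Int → Int) (l : List (Int × Int)), l ≠ [] → ∃ m, (l.map f).max? = some m := by
    intro f l hl
    cases hm : (l.map f).max? with
    | none => exact absurd (List.map_eq_nil_iff.mp (List.max?_eq_none_iff.mp hm)) hl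
    | some m => exact ⟨m, rfl⟩
  obtain ⟨a1, e1⟩ := hne (fun p => p.1 - 1) s1 h1
  obtain ⟨a2, e2⟩ := hne' (fun p => p.1 + 1) s1 h1
  obtain ⟨a3, e3⟩ := hne (fun p => p.2 - 1) s1 h1
  obtain ⟨a4, e4⟩ := hne' (fun p => p.2 + 1) s1 h1
  obtain ⟨b1, f1⟩ := hne (fun p => p.1 - 1) s2 h2
  obtain ⟨b2, f2⟩ := hne' (fun p => p.1 + 1) s2 h2
  obtain ⟨b3, f3⟩ := hne (fun p => p.2 - 1) s2 h2
  obtain ⟨b4, f4⟩ := hne' (fun p => p.2 + 1) s2 h2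
  simp only [List.map_append, pvMinAppend, pvMaxAppend, e1, e2, e3, e4, f1, f2, f3, f4, hset]
  rfl

theorem pvPass_map (segs : List (List (Int × Int))) (h : ∀ s ∈ segs, s ≠ []) :
    pvPass (segs.map pvBSpec) = (pvPairJoin segs).map pvBSpec := by
  induction segs using pvPairJoin.induct with
  | case1 => rfl
  | case2 s => rfl
  | case3 a b t ih =>
    simp only [List.map_cons, pvPass_cons2, pvPairJoin]
    rw [pvMerge_spec a b (h a (by simp)) (h b (by simp)),
       ih (fun u hu => h u (by simp [hu]))]

theorem pvRoundsSpec : ∀ (fuel : Nat) (segs : List (List (Int × Int))), segs ≠ [] →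
    (∀ s ∈ segs, s ≠ []) → segs.length ≤ fuel →
    pvWhileRounds fuel (segs.map pvBSpec) = [pvBSpec segs.flatten] := by
  intro fuel
  induction fuel with
  | zero =>
    intro segs hne _ hlen
    cases segs with
    | nil => exact absurd rfl hne
    | cons a t => simp at hlen
  | succ f ih =>
    intro segs hne hseg hlen
    cases segs with
    | nil => exact absurd rfl hne
    | cons a t =>
      cases t with
      | nil =>
        rw [pvWhileRounds_stop _ _ (by simp)]
        simp
      | cons b u =>
        rw [pvWhileRounds_step _ _ (by simp only [List.length_map, List.length_cons]; omega),
          pvPass_map _ hseg,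
          ih (pvPairJoin (a :: b :: u)) (pvPairJoin_ne_nil _ (by simp))
            (pvPairJoin_nonempty _ hseg) ?_,
          pvPairJoin_flatten]
        have := pvPairJoin_length a b u
        simp at hlen ⊢
        omega

-- B's per-pixel comprehension generates pvNine
theorem pvNine_eq (x y : Int) :
    ([(-1 : Int), 0, 1]).flatMap (fun dy => ([(-1 : Int), 0, 1]).map (fun dx => (x + dx, y + dy))) =
    pvNine (x, y) := by
  simp only [List.flatMap_cons, List.map_cons, List.map_nil, List.flatMap_nil, List.append_nil,
    List.cons_append, List.nil_append, pvNine, List.cons.injEq, Prod.mk.injEq]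
  and_intros <;> first | trivial | omega

-- each leaf result is the summary of its one-pixel segment
theorem pvLeaf_eq (pq : Int × Int) :
    (PySem.Set.ofList (([(-1 : Int), 0, 1]).flatMap (fun dy =>
        ([(-1 : Int), 0, 1]).map (fun dx => (pq.1 + dx, pq.2 + dy)))),
     (pq.1 - 1, pq.1 + 1, pq.2 - 1, pq.2 + 1)) = pvBSpec [pq] := by
  unfold pvBSpec
  rw [pvNine_eq pq.1 pq.2]
  rfl

theorem pvFoldAppend (image : List (Int × Int)) :
    ∀ acc, image.foldl
      (fun acc pq =>
        acc ++ [(PySem.Set.ofList (([(-1 : Int), 0, 1]).flatMap (fun dy =>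
                  ([(-1 : Int), 0, 1]).map (fun dx => (pq.1 + dx, pq.2 + dy)))),
                (pq.1 - 1, pq.1 + 1, pq.2 - 1, pq.2 + 1))]) acc
    = acc ++ (image.map (fun p => [p])).map pvBSpec := by
  induction image with
  | nil => intro acc; simp
  | cons p t ih =>
    intro acc
    rw [List.foldl_cons, ih, List.map_cons, List.map_cons, pvLeaf_eq, List.append_assoc]
    rfl

theorem pvFlattenSingletons (image : List (Int × Int)) :
    (image.map (fun p => [p])).flatten = image := by
  induction image with
  | nil => rfl
  | cons p t ih => simp [ih]

-- full characterisation of B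
theorem pvBChar (image : List (Int × Int)) : setPixelsToCheck_alt image = pvBSpec image := by
  unfold setPixelsToCheck_alt
  cases image with
  | nil => rfl
  | cons p t =>
    simp only [if_neg (by simp : ¬ (p :: t = []))]
    rw [pvFoldAppend (p :: t) []]
    simp only [List.nil_append]
    rw [show (((p :: t).map (fun p => [p])).map pvBSpec).length = ((p :: t).map (fun p => [p])).length from List.length_map _]
    rw [pvRoundsSpec _ ((p :: t).map (fun p => [p])) (by simp)
        (by intro s hs; obtain ⟨q, _, rfl⟩ := List.mem_map.mp hs; simp) (by simp),
      pvFlattenSingletons]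
    rfl

-- ===== VERDICT (by name: the statement is the Claim_ definition above) =====
theorem setPixelsToCheck_spec : Claim_unchanged_setPixelsToCheck := by
  intro image _ hD
  show setPixelsToCheck image = setPixelsToCheck_alt image
  rw [pvBChar]
  unfold setPixelsToCheck
  simp only [pvFusedSplit, pvBSpec]
  cases himg : image with
  | nil => simp
  | cons p t =>
    rw [himg] at hD
    rw [pvD_iff] at hD
    push Not at hD
    obtain ⟨⟨q1, hq1m, hq1⟩, ⟨q2, hq2m, hq2⟩, ⟨q3, hq3m, hq3⟩, ⟨q4, hq4m, hq4⟩⟩ := hD (by simp)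
    have key_min : ∀ (f : Int × Int → Int) (qq : Int × Int), qq ∈ p :: t → f qq ≤ 10000 →
        ((p :: t).map (fun r => f r - 1)).foldl min 9999 = ((p :: t).map (fun r => f r - 1)).min?.getD 9999 := by
      intro f qq hqm hqle
      rw [pvFoldlMin]
      cases h : ((p :: t).map (fun r => f r - 1)).min? with
      | none => simp at h
      | some m =>
        have : m ≤ f qq - 1 := pvMin?_le _ m (f qq - 1) h (List.mem_map_of_mem hqm)
        simp only [Option.elim, Option.getD_some]
        omega
    have key_max : ∀ (f : Int × Int → Int) (qq : Int × Int), qq ∈ p :: t → -10000 ≤ f qq →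
        ((p :: t).map (fun r => f r + 1)).foldl max (-9999) = ((p :: t).map (fun r => f r + 1)).max?.getD (-9999) := by
      intro f qq hqm hqle
      rw [pvFoldlMax]
      cases h : ((p :: t).map (fun r => f r + 1)).max? with
      | none => simp at h
      | some m =>
        have : f qq + 1 ≤ m := pvLe_max? _ m (f qq + 1) h (List.mem_map_of_mem hqm)
        simp only [Option.elim, Option.getD_some]
        omega
    refine Prod.ext ?_ (Prod.ext ?_ (Prod.ext ?_ (Prod.ext ?_ ?_))) <;> simp only
    · exact (PySem.Set.ofList_eq_foldl _).symm
    · exact key_min (fun r => r.1) q1 hq1m (by omega)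
    · exact key_max (fun r => r.1) q2 hq2m (by omega)
    · exact key_min (fun r => r.2) q3 hq3m (by omega)
    · exact key_max (fun r => r.2) q4 hq4m (by omega)

theorem setPixelsToCheck_changed : Claim_changed_setPixelsToCheck := by
  unfold Claim_changed_setPixelsToCheck; decide

theorem setPixelsToCheck_tight : Claim_exact_setPixelsToCheck := by
  intro image _ hD heq
  obtain ⟨hne, hcase⟩ := (pvD_iff image).mp hD
  cases himg : image with
  | nil => exact hne himg
  | cons p t =>
    subst himg
    rw [pvBChar] at heq
    unfold setPixelsToCheck at heq
    simp only [pvFusedSplit, pvBSpec] at heq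
    have e1 := congrArg (fun r => r.2.1) heq
    have e2 := congrArg (fun r => r.2.2.1) heq
    have e3 := congrArg (fun r => r.2.2.2.1) heq
    have e4 := congrArg (fun r => r.2.2.2.2) heq
    simp only at e1 e2 e3 e4
    have bound_min : ∀ (f : Int × Int → Int), (∀ r ∈ p :: t, 10000 < f r) →
        ((p :: t).map (fun r => f r - 1)).foldl min 9999 ≠ ((p :: t).map (fun r => f r - 1)).min?.getD 9999 := by
      intro f hall
      rw [pvFoldlMin]
      cases h : ((p :: t).map (fun r => f r - 1)).min? with
      | none => simp at h
      | some m =>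
        obtain ⟨r, hr, hrm⟩ := List.mem_map.mp (pvMin?_mem _ m h)
        have := hall r hr
        simp only [Option.elim, Option.getD_some]
        omega
    have bound_max : ∀ (f : Int × Int → Int), (∀ r ∈ p :: t, f r < -10000) →
        ((p :: t).map (fun r => f r + 1)).foldl max (-9999) ≠ ((p :: t).map (fun r => f r + 1)).max?.getD (-9999) := by
      intro f hall
      rw [pvFoldlMax]
      cases h : ((p :: t).map (fun r => f r + 1)).max? with
      | none => simp at h
      | some m =>
        obtain ⟨r, hr, hrm⟩ := List.mem_map.mp (pvMax?_mem _ m h)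
        have := hall r hr
        simp only [Option.elim, Option.getD_some]
        omega
    rcases hcase with h | h | h | h
    · exact bound_min (fun r => r.1) h e1
    · exact bound_max (fun r => r.1) h e2
    · exact bound_min (fun r => r.2) h e3
    · exact bound_max (fun r => r.2) h e4
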